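-- pv_equiv track=rewrite | github.com/IHateChem/Algo_practice | 프로그래머스/3/42579. 베스트앨범/베스트앨범.py | solution
-- ===== SOURCE A (Python) =====
-- from collections import defaultdict as dd
-- import heapq
--
-- def solution(genres, plays):
--     answer = []
--     total = dd(int)
--     genreHeap = dd(list)
--     idx=0
--     for genre, play in zip(genres, plays):
--         total[genre] += play
--         heapq.heappush(genreHeap[genre], (-1*play, idx))
--         idx += 1
--     for genre, _ in sorted(total.items(), key = lambda t: t[1], reverse = True):
--         n = 0
--         while genreHeap[genre] and n < 2:
--             p,i = heapq.heappop(genreHeap[genre])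
--             answer.append(i)
--             n += 1
--     return answer
-- ===== SOURCE B (Python) =====
-- def solution(genres, plays):
--     # One pass keeping (total, best-two) per genre; no heaps.
--     info = {}
--     for i, (g, p) in enumerate(zip(genres, plays)):
--         t, top = info.get(g, (0, []))
--         top = sorted(top + [(-p, i)])[:2]
--         info[g] = (t + p, top)
--     out = []
--     for g, (t, top) in sorted(info.items(), key=lambda kv: kv[1][0], reverse=True):
--         out.extend(i for _, i in top)
--     return out
-- ===== Notes on version B (the rewrite author's own statement) =====
-- stated objective: simpler
-- what changed: B drops the per-genre heaps and the final pop-while loop: one pass keeps (total, best-two) per genre in a single dict, then genres sorted by total are just concatenated.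
import Mathlib
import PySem

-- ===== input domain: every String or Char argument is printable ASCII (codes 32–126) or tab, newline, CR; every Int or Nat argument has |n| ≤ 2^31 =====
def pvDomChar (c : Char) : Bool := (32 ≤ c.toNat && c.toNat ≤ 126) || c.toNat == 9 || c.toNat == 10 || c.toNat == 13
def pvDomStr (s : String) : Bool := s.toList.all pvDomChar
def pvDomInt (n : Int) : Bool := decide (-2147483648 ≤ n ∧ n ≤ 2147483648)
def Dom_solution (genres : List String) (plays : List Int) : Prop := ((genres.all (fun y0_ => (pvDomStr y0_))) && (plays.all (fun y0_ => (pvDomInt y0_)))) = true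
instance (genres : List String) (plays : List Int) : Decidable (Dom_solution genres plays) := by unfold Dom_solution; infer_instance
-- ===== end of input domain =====

-- B replaces the per-genre heap of all songs by a best-two list maintained in one pass (objective: simpler).

-- ===== PORT A =====
-- Python tuple '<' on (Int × Int), as heapq compares (-play, idx) pairs
def lexLt (a b : Int × Int) : Bool :=
  decide (a.1 < b.1) || (!decide (b.1 < a.1) && decide (a.2 < b.2))

-- heapq heap modelled by its pop-order (ascending sorted) list: heappush = ordered insert,
-- heappop = head.  Observably exact: a binary heap's pops return its elements in ascending order.
def heapPush (h : List (Int × Int)) (x : Int × Int) : List (Int × Int) :=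
  PySem.List.insertBy lexLt x h

-- the 'while genreHeap[genre] and n < 2' loop: pops and appends indices
def popLoop : List (Int × Int) → Int → List Int → List (Int × Int) × List Int
  | [], _, ans => ([], ans)
  | x :: t, n, ans => if n < 2 then popLoop t (n + 1) (ans ++ [x.2]) else (x :: t, ans)

def solution (genres : List String) (plays : List Int) : List Int :=
  let st := (List.zip genres plays).foldl
    (fun (s : PySem.Dict String Int × PySem.Dict String (List (Int × Int)) × Int) gp =>
      (s.1.modify gp.1 0 (· + gp.2),
       s.2.1.modify gp.1 [] (fun h => heapPush h (-1 * gp.2, s.2.2)),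
       s.2.2 + 1))
    (PySem.Dict.empty, PySem.Dict.empty, 0)
  ((PySem.List.sorted st.1.items (fun t => t.2) true).foldl
    (fun (s : List Int × PySem.Dict String (List (Int × Int))) p =>
      let r := popLoop (s.2.getD p.1 []) 0 s.1
      (r.2, s.2.insert p.1 r.1))
    ([], st.2.1)).1

-- ===== PORT B =====
def solution_alt (genres : List String) (plays : List Int) : List Int :=
  let info := (PySem.List.enumerate (List.zip genres plays)).foldl
    (fun (info : PySem.Dict String (Int × List (Int × Int))) ip =>
      let tt := info.getD ip.2.1 (0, [])
      info.insert ip.2.1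
        (tt.1 + ip.2.2,
         (PySem.List.sorted2 (tt.2 ++ [(-ip.2.2, ip.1)]) (fun q => q.1) (fun q => q.2)).take 2))
    PySem.Dict.empty
  (PySem.List.sorted info.items (fun kv => kv.2.1) true).foldl
    (fun out kv => out ++ kv.2.2.map (fun q => q.2)) []

-- ===== PRECONDITION & SPEC =====
def Spec_solution (genres : List String) (plays : List Int) (out : List Int) : Prop := out = solution_alt genres plays
instance (genres : List String) (plays : List Int) (out : List Int) : Decidable (Spec_solution genres plays out) := by unfold Spec_solution; infer_instance

-- ===== CLAIM (what is proved, stated in full; the proofs are below) =====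
def Claim_equal_solution : Prop := ∀ (genres : List String) (plays : List Int), Dom_solution genres plays → Spec_solution genres plays (solution genres plays)

-- ===== LEMMAS AND PROOFS =====

-- ordering facts about lexLt
lemma lexLt_asymm {x y : Int × Int} (h : lexLt x y = true) : lexLt y x = false := by
  simp [lexLt] at *; omega

lemma lexLt_trans_false {x y z : Int × Int} (h1 : lexLt x y = true) (h2 : lexLt z y = false) :
    lexLt z x = false := by
  simp [lexLt] at *; omega

-- insertBy with lexLt preserves sortedness
lemma insertBy_pairwise (x : Int × Int) (h : List (Int × Int))
    (hp : h.Pairwise (fun a b => lexLt b a = false)) :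
    (PySem.List.insertBy lexLt x h).Pairwise (fun a b => lexLt b a = false) := by
  induction h with
  | nil => simp [PySem.List.insertBy]
  | cons y t ih =>
    rcases List.pairwise_cons.mp hp with ⟨hy, ht⟩
    by_cases hb : lexLt x y = true
    · have he : PySem.List.insertBy lexLt x (y :: t) = x :: y :: t := by
        simp [PySem.List.insertBy, hb]
      rw [he]
      refine List.pairwise_cons.mpr ⟨?_, hp⟩
      intro z hz
      rcases List.mem_cons.mp hz with rfl | hzt
      · exact lexLt_asymm hb
      · exact lexLt_trans_false hb (hy z hzt)
    · have he : PySem.List.insertBy lexLt x (y :: t) = y :: PySem.List.insertBy lexLt x t := by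
        simp [PySem.List.insertBy, hb]
      rw [he]
      rw [Bool.not_eq_true] at hb
      refine List.pairwise_cons.mpr ⟨?_, ih ht⟩
      intro z hz
      rcases (PySem.List.mem_insertBy lexLt x z t).mp hz with rfl | hzt
      · exact hb
      · exact hy z hzt

-- insertion-sorting an already sorted list leaves it unchanged
lemma foldl_insertBy_sorted : ∀ (l acc : List (Int × Int)),
    ((acc ++ l).Pairwise (fun a b => lexLt b a = false)) →
    l.foldl (fun acc x => PySem.List.insertBy lexLt x acc) acc = acc ++ l := by
  intro l
  induction l with
  | nil => intro acc _; simp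
  | cons x t ih =>
    intro acc hp
    have hx : ∀ y ∈ acc, lexLt x y = false := by
      intro y hy
      have := (List.pairwise_append.mp hp).2.2 y hy x (by simp)
      exact this
    have h1 : PySem.List.insertBy lexLt x acc = acc ++ [x] :=
      PySem.List.insertBy_of_forall_not_before lexLt x acc hx
    simp only [List.foldl_cons, h1]
    have := ih (acc ++ [x]) (by simpa using hp)
    simpa using this

lemma sorted2_eq_foldl (xs : List (Int × Int)) :
    PySem.List.sorted2 xs (fun q => q.1) (fun q => q.2) =
      xs.foldl (fun acc x => PySem.List.insertBy lexLt x acc) [] := rfl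

-- truncation to the best two commutes with insertion
lemma take2_insertBy (b : (Int × Int) → (Int × Int) → Bool) (x : Int × Int) (h : List (Int × Int)) :
    (PySem.List.insertBy b x h).take 2 = (PySem.List.insertBy b x (h.take 2)).take 2 := by
  rcases h with _ | ⟨a, _ | ⟨c, t⟩⟩
  · rfl
  · rfl
  · by_cases h1 : b x a = true
    · simp [PySem.List.insertBy, h1]
    · by_cases h2 : b x c = true <;>
        simp [PySem.List.insertBy, h1, h2]

-- B's best-two update equals the best two of A's heap after a push
lemma top_step (h : List (Int × Int)) (x : Int × Int)
    (hp : h.Pairwise (fun a b => lexLt b a = false)) :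
    (PySem.List.sorted2 ((h.take 2) ++ [x]) (fun q => q.1) (fun q => q.2)).take 2 =
      (heapPush h x).take 2 := by
  have h2 : (h.take 2).Pairwise (fun a b => lexLt b a = false) := hp.take
  rw [sorted2_eq_foldl, List.foldl_append]
  rw [foldl_insertBy_sorted (h.take 2) [] (by simpa using h2)]
  simp only [List.nil_append, List.foldl_cons, List.foldl_nil]
  rw [heapPush, ← take2_insertBy]

-- the while-loop pops the two smallest elements
lemma popLoop_eq (h : List (Int × Int)) (ans : List Int) :
    popLoop h 0 ans = (h.drop 2, ans ++ (h.take 2).map (fun q => q.2)) := by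
  rcases h with _ | ⟨x, _ | ⟨y, t⟩⟩
  · norm_num [popLoop]
  · norm_num [popLoop]
  · cases t <;> norm_num [popLoop]

-- a stable reverse sort commutes with a key-preserving map
lemma insertBy_map {α β : Type} (f : α → β) (bA : α → α → Bool) (bB : β → β → Bool)
    (hb : ∀ a a', bB (f a) (f a') = bA a a') (x : α) : ∀ (l : List α),
    PySem.List.insertBy bB (f x) (l.map f) = (PySem.List.insertBy bA x l).map f := by
  intro l
  induction l with
  | nil => rfl
  | cons y t ih =>
    by_cases h1 : bA x y = true <;>
      simp [PySem.List.insertBy, hb, h1, ih]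

lemma sorted_rev_map_eq {α β κ : Type} [LinearOrder κ] (f : α → β) (keyA : α → κ) (keyB : β → κ)
    (hk : ∀ a, keyB (f a) = keyA a) (l : List α) :
    PySem.List.sorted (l.map f) keyB true = (PySem.List.sorted l keyA true).map f := by
  rw [PySem.List.sorted_rev_eq_foldl_insertBy, PySem.List.sorted_rev_eq_foldl_insertBy]
  have hb : ∀ a a', (fun a b => decide (keyB b < keyB a)) (f a) (f a') =
      (fun a b => decide (keyA b < keyA a)) a a' := by
    intro a a'; simp [hk]
  suffices hgen : ∀ (l : List α) (acc : List α),
      (l.map f).foldl (fun acc x => PySem.List.insertBy (fun a b => decide (keyB b < keyB a)) x acc) (acc.map f) =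
        (l.foldl (fun acc x => PySem.List.insertBy (fun a b => decide (keyA b < keyA a)) x acc) acc).map f by
    simpa using hgen l []
  intro l'
  induction l' with
  | nil => intro acc; rfl
  | cons x t ih =>
    intro acc
    simp only [List.map_cons, List.foldl_cons]
    rw [insertBy_map f _ _ hb x acc, ih]

-- the invariant tying A's state (totals, heaps) to B's state (info)
def InvAB (total : PySem.Dict String Int) (heaps : PySem.Dict String (List (Int × Int)))
    (info : PySem.Dict String (Int × List (Int × Int))) : Prop :=
  total.keys.Nodup ∧
  info.items = total.items.map (fun kv => (kv.1, (kv.2, (heaps.getD kv.1 []).take 2))) ∧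
  (∀ g, total.contains g = false → heaps.getD g [] = []) ∧
  (∀ g, (heaps.getD g []).Pairwise (fun a b => lexLt b a = false))

lemma InvAB_getD (total : PySem.Dict String Int) (heaps : PySem.Dict String (List (Int × Int)))
    (info : PySem.Dict String (Int × List (Int × Int))) (hI : InvAB total heaps info) (g : String) :
    info.getD g (0, []) = (total.getD g 0, (heaps.getD g []).take 2) := by
  obtain ⟨hnd, hitems, hc0, -⟩ := hI
  have hkeys : info.keys = total.keys := by
    simp [PySem.Dict.keys, hitems, List.map_map, Function.comp_def]
  by_cases hc : total.contains g = true
  · rw [PySem.Dict.contains_eq_isSome_get?] at hc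
    obtain ⟨v, hv⟩ := Option.isSome_iff_exists.mp hc
    have hmem : (g, v) ∈ total.items := PySem.Dict.mem_items_of_get?_eq_some total hv
    have hmem' : (g, (v, (heaps.getD g []).take 2)) ∈ info.items := by
      rw [hitems]
      exact List.mem_map.mpr ⟨(g, v), hmem, rfl⟩
    have hndI : info.keys.Nodup := by rw [hkeys]; exact hnd
    rw [PySem.Dict.getD_of_mem_items info hmem' hndI,
        PySem.Dict.getD_of_get?_eq_some total 0 hv]
  · have hcf : total.contains g = false := by simpa using hc
    have hcfI : info.contains g = false := by
      rw [PySem.Dict.contains_eq_decide_mem_keys, hkeys,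
          ← PySem.Dict.contains_eq_decide_mem_keys]
      exact hcf
    rw [PySem.Dict.getD_of_not_contains info _ hcfI,
        PySem.Dict.getD_of_not_contains total _ hcf, hc0 g hcf]
    simp

lemma InvAB_step (total : PySem.Dict String Int) (heaps : PySem.Dict String (List (Int × Int)))
    (info : PySem.Dict String (Int × List (Int × Int))) (idx : Int) (g : String) (p : Int)
    (hI : InvAB total heaps info) :
    InvAB (total.modify g 0 (· + p))
        (heaps.modify g [] (fun h => heapPush h (-1 * p, idx)))
        (info.insert g
          ((info.getD g (0, [])).1 + p,
           (PySem.List.sorted2 ((info.getD g (0, [])).2 ++ [(-p, idx)])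
             (fun q => q.1) (fun q => q.2)).take 2)) := by
  obtain ⟨hnd, hitems, hc0, hpw⟩ := hI
  have hg := InvAB_getD total heaps info ⟨hnd, hitems, hc0, hpw⟩ g
  have hkeys : info.keys = total.keys := by
    simp [PySem.Dict.keys, hitems, List.map_map, Function.comp_def]
  have hneg : (-1 : Int) * p = -p := by ring
  have htop : (PySem.List.sorted2 ((heaps.getD g []).take 2 ++ [(-p, idx)])
      (fun q => q.1) (fun q => q.2)).take 2 = (heapPush (heaps.getD g []) (-p, idx)).take 2 :=
    top_step (heaps.getD g []) (-p, idx) (hpw g)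
  simp only [PySem.Dict.modify, hg, hneg, htop]
  refine ⟨PySem.Dict.nodup_keys_insert _ _ _ hnd, ?_, ?_, ?_⟩
  · -- items relation
    by_cases hc : total.contains g = true
    · have hcI : info.contains g = true := by
        rw [PySem.Dict.contains_eq_decide_mem_keys, hkeys, ← PySem.Dict.contains_eq_decide_mem_keys]
        exact hc
      rw [PySem.Dict.items_insert_of_contains _ _ hcI, PySem.Dict.items_insert_of_contains _ _ hc,
          hitems, List.map_map, List.map_map]
      apply List.map_congr_left
      intro kv _
      by_cases hkvg : kv.1 = g
      · simp [hkvg, PySem.Dict.getD_insert]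
      · simp [hkvg, PySem.Dict.getD_insert]
    · have hcf : total.contains g = false := by simpa using hc
      have hcI : info.contains g = false := by
        rw [PySem.Dict.contains_eq_decide_mem_keys, hkeys, ← PySem.Dict.contains_eq_decide_mem_keys]
        exact hcf
      have hgk : g ∉ total.keys := by
        have := PySem.Dict.contains_eq_decide_mem_keys total g
        rw [hcf] at this
        simpa using this.symm
      rw [PySem.Dict.items_insert_of_not_contains _ _ hcI,
          PySem.Dict.items_insert_of_not_contains _ _ hcf,
          hitems, List.map_append]
      congr 1
      · apply List.map_congr_left
        intro kv hkv
        have hkvg : kv.1 ≠ g := by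
          intro h
          exact hgk (h ▸ List.mem_map.mpr ⟨kv, hkv, rfl⟩)
        simp [PySem.Dict.getD_insert, hkvg]
      · simp [PySem.Dict.getD_insert]
  · -- empty heaps for absent genres
    intro g' hg'
    by_cases hgg : g' = g
    · subst hgg
      rw [PySem.Dict.contains_insert_self] at hg'
      cases hg'
    · rw [PySem.Dict.contains_insert] at hg'
      simp only [Bool.or_eq_false_iff] at hg'
      rw [PySem.Dict.getD_insert]
      simp only [hgg, if_false]
      exact hc0 g' hg'.2
  · -- heaps stay sorted
    intro g'
    by_cases hgg : g' = g
    · subst hgg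
      rw [PySem.Dict.getD_insert, if_pos rfl]
      exact insertBy_pairwise _ _ (hpw g')
    · rw [PySem.Dict.getD_insert]
      simp only [hgg, if_false]
      exact hpw g' 

lemma main_loop : ∀ (l : List (String × Int)) (total : PySem.Dict String Int)
    (heaps : PySem.Dict String (List (Int × Int))) (info : PySem.Dict String (Int × List (Int × Int)))
    (idx : Int), InvAB total heaps info →
    InvAB (l.foldl
          (fun (s : PySem.Dict String Int × PySem.Dict String (List (Int × Int)) × Int) gp =>
            (s.1.modify gp.1 0 (· + gp.2),
             s.2.1.modify gp.1 [] (fun h => heapPush h (-1 * gp.2, s.2.2)),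
             s.2.2 + 1)) (total, heaps, idx)).1
        (l.foldl
          (fun (s : PySem.Dict String Int × PySem.Dict String (List (Int × Int)) × Int) gp =>
            (s.1.modify gp.1 0 (· + gp.2),
             s.2.1.modify gp.1 [] (fun h => heapPush h (-1 * gp.2, s.2.2)),
             s.2.2 + 1)) (total, heaps, idx)).2.1
        ((PySem.List.enumerate l idx).foldl
          (fun (info : PySem.Dict String (Int × List (Int × Int))) ip =>
            let tt := info.getD ip.2.1 (0, [])
            info.insert ip.2.1
              (tt.1 + ip.2.2,
               (PySem.List.sorted2 (tt.2 ++ [(-ip.2.2, ip.1)]) (fun q => q.1) (fun q => q.2)).take 2))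
          info) := by
  intro l
  induction l with
  | nil => intro total heaps info idx h; exact h
  | cons gp t ih =>
    intro total heaps info idx h
    obtain ⟨g, p⟩ := gp
    have he : PySem.List.enumerate ((g, p) :: t) idx = (idx, (g, p)) :: PySem.List.enumerate t (idx + 1) := rfl
    rw [he]
    simp only [List.foldl_cons]
    exact ih _ _ _ _ (InvAB_step total heaps info idx g p h)

-- A's output loop over distinct genres reads the untouched heap of each genre
lemma out_loop : ∀ (items : List (String × Int)) (d heaps0 : PySem.Dict String (List (Int × Int)))
    (acc : List Int),
    (∀ g ∈ items.map Prod.fst, d.getD g [] = heaps0.getD g []) →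
    (items.map Prod.fst).Nodup →
    (items.foldl
      (fun (s : List Int × PySem.Dict String (List (Int × Int))) p =>
        let r := popLoop (s.2.getD p.1 []) 0 s.1
        (r.2, s.2.insert p.1 r.1)) (acc, d)).1 =
      acc ++ items.flatMap (fun p => ((heaps0.getD p.1 []).take 2).map (fun q => q.2)) := by
  intro items
  induction items with
  | nil => intro d heaps0 acc _ _; simp
  | cons p t ih =>
    intro d heaps0 acc hag hnd
    have hpd : d.getD p.1 [] = heaps0.getD p.1 [] := hag p.1 (by simp)
    rw [List.foldl_cons]
    have hstep : (let r := popLoop ((acc, d).2.getD p.1 []) 0 (acc, d).1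
        ((r.2, (acc, d).2.insert p.1 r.1) : List Int × PySem.Dict String (List (Int × Int)))) =
        (acc ++ ((heaps0.getD p.1 []).take 2).map (fun q => q.2),
         d.insert p.1 ((heaps0.getD p.1 []).drop 2)) := by
      simp only [popLoop_eq, hpd]
    rw [hstep]
    rw [ih (d.insert p.1 ((heaps0.getD p.1 []).drop 2)) heaps0 _ ?_ ?_]
    · simp
    · intro g hg
      rw [PySem.Dict.getD_insert]
      have hne : g ≠ p.1 := by
        intro h
        exact (List.nodup_cons.mp (by simpa using hnd)).1 (h ▸ hg)
      simp only [hne, if_false]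
      exact hag g (by simp [hg])
    · exact (List.nodup_cons.mp (by simpa using hnd)).2

-- assembling the output phase: A's pop loop over sorted totals = B's concatenation over sorted info
lemma assemble (T : PySem.Dict String Int) (H : PySem.Dict String (List (Int × Int)))
    (I : PySem.Dict String (Int × List (Int × Int)))
    (hnd : T.keys.Nodup)
    (hitems : I.items = T.items.map (fun kv => (kv.1, (kv.2, (H.getD kv.1 []).take 2)))) :
    ((PySem.List.sorted T.items (fun t => t.2) true).foldl
      (fun (s : List Int × PySem.Dict String (List (Int × Int))) p =>
        let r := popLoop (s.2.getD p.1 []) 0 s.1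
        (r.2, s.2.insert p.1 r.1)) ([], H)).1 =
    (PySem.List.sorted I.items (fun kv => kv.2.1) true).foldl
      (fun out kv => out ++ kv.2.2.map (fun q => q.2)) [] := by
  have hsortnd : ((PySem.List.sorted T.items (fun t => t.2) true).map Prod.fst).Nodup := by
    have hperm : (PySem.List.sorted T.items (fun t => t.2) true).Perm T.items :=
      PySem.List.sorted_perm _ _ _
    exact ((hperm.map Prod.fst).nodup_iff).mpr (by simpa [PySem.Dict.keys] using hnd)
  rw [out_loop (PySem.List.sorted T.items (fun t => t.2) true) H H [] (fun g _ => rfl) hsortnd]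
  have hs := sorted_rev_map_eq
      (fun (kv : String × Int) => (kv.1, (kv.2, (H.getD kv.1 []).take 2)))
      (fun kv => kv.2) (fun kv => kv.2.1) (fun _ => rfl) T.items
  rw [hitems, hs, PySem.List.foldl_append_eq_flatMap, List.flatMap_map]

-- ===== VERDICT (by name: the statement is the Claim_ definition above) =====
theorem solution_spec : Claim_equal_solution := by
  intro genres plays _
  unfold Spec_solution
  obtain ⟨hnd, hitems, -, -⟩ :=
    main_loop (List.zip genres plays) PySem.Dict.empty PySem.Dict.empty PySem.Dict.empty 0
      ⟨PySem.Dict.nodup_keys_empty, rfl,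
       fun g _ => PySem.Dict.getD_empty g [],
       fun g => by rw [PySem.Dict.getD_empty]; exact List.Pairwise.nil⟩
  simp only [solution, solution_alt]
  exact assemble _ _ _ hnd hitems
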